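-- pv_equiv track=rewrite | github.com/spdkh/quera | 10233.py | check
-- ===== SOURCE A (Python) =====
-- def check2(x):
-- 	x = ''.join(x)
-- 	minim = max(map(int, x))
--
-- 	for i in x[1:]:
-- 		if int(i) < minim and int(i) >= int(x[0]):
-- 			minim = int(i)
-- 	minim = str(minim)
--
-- 	x = x.replace(minim, x[0], 1)
-- 	x = x.replace(x[0], minim, 1)
--
-- 	y = list(x[1:])
-- 	y.sort()
-- 	y = ''.join(y)
--
-- 	return x[0]+y
--
-- def check(x):
-- 	y = list(x[:])
-- 	x = list(x)
-- 	x.sort()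
-- 	x.reverse()
--
-- 	if x == y:
-- 		return '0'
--
-- 	if len(y) == 2:
-- 		y = list(y)
-- 		y.reverse()
-- 		y = ''.join(y)
-- 		return y
--
-- 	if check(y[1:]) == '0':
-- 		return check2(y)
--
-- 	y = ''.join(y)
-- 	return y[0]+check(y[1:])
-- ===== SOURCE B (Python) =====
-- def check(x):
--     # one right-to-left pass; r = next permutation of the suffix scanned so far (None if that
--     # suffix is non-increasing), suffix = the chars scanned so far
--     r = None
--     suffix = []
--     for h in reversed(x):
--         if r is not None:
--             r = [h] + r
--         elif suffix and h < suffix[0]: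
--             c = min(d for d in suffix if d > h)
--             rest = list(suffix)
--             rest.remove(c)
--             rest.append(h)
--             rest.sort()
--             r = [c] + rest
--         suffix = [h] + suffix
--     return '0' if r is None else ''.join(r)
-- ===== Notes on version B (the rewrite author's own statement) =====
-- stated objective: faster
-- what changed: A recomputes check(y[1:]) twice per level (exponentially many recursive calls) and rebuilds the answer via max/replace/replace string surgery in check2; B computes the next lexicographic permutation in one right-to-left pass with an accumulator (timing: A times out at n=64 where B returns).
-- intended difference: On inputs whose pivot character (the last character smaller than its successor, with at least two characters after it) also occurs in the non-increasing tail after it, A's check2 picks the smallest tail digit >= pivot, which is the pivot itself, and returns the pivot followed by the sorted tail, a permutation smaller than the input; B swaps the pivot with the smallest tail character strictly greater than it and returns the true next permutation, which is what the next-bigger-permutation task intends (see pvDiffWitnessOut_check). — e.g. on check("121"): A returns "112", B returns "211"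
import Mathlib
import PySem

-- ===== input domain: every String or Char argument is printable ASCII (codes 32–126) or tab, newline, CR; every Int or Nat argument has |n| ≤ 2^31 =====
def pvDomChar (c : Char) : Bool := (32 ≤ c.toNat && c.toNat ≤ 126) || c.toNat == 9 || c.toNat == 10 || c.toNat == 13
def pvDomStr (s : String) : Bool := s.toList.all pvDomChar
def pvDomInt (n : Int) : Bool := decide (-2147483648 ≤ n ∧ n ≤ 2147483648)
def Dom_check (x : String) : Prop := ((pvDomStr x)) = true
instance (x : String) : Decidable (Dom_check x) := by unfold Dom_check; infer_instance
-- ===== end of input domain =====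

-- B replaces A's exponential double recursion (check(y[1:]) evaluated twice per level) and check2's
-- max/replace/replace digit surgery by one right-to-left pass computing the next lexicographic
-- permutation directly; B also fixes A's wrong value when the pivot character repeats in the tail.

-- ===== PORT A =====
-- int(c) for a digit character (non-digits make Python raise ValueError; such inputs are outside Pre_check)
def digitVal (c : Char) : Int := (c.toNat : Int) - 48
-- str(n) for 0 ≤ n ≤ 9 (the only values reaching it under Pre_check)
def digitChr (n : Int) : Char := Char.ofNat (n.toNat + 48)
-- s.replace(o, nw, 1) for one-character strings o, nw (the only patterns A ever passes)
def replaceFirst : List Char → Char → Char → List Char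
  | [], _, _ => []
  | a :: r, o, nw => if a = o then nw :: r else a :: replaceFirst r o nw

def check2L : List Char → List Char
  | [] => []   -- unreachable: A calls check2 only on strings of length ≥ 3 (max() would raise on '')
  | x0 :: xt =>
    let minim0 : Int := xt.foldl (fun m c => max m (digitVal c)) (digitVal x0)  -- max(map(int, x))
    let minim : Int :=
      xt.foldl (fun m c => if digitVal c < m ∧ digitVal x0 ≤ digitVal c then digitVal c else m) minim0
    let mc : Char := digitChr minim
    let x1 := replaceFirst (x0 :: xt) mc x0          -- x.replace(minim, x[0], 1)
    let x2 := replaceFirst x1 (x1.headD ' ') mc      -- x.replace(x[0], minim, 1)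
    x2.take 1 ++ PySem.List.sorted (x2.drop 1) (fun c => c) false   -- x[0] + sorted(x[1:])

def checkL : List Char → List Char
  | [] => ['0']   -- [] equals its descending sort, so Python returns '0' here
  | h :: t =>
    let xs := (PySem.List.sorted (h :: t) (fun c => c) false).reverse  -- x.sort(); x.reverse()
    if xs = h :: t then ['0']
    else if (h :: t).length = 2 then (h :: t).reverse
    else if checkL t = ['0'] then check2L (h :: t)
    else h :: checkL t

def check (x : String) : String := String.ofList (checkL x.toList)

-- ===== PORT B =====
def nextStep (h : Char) (st : Option (List Char) × List Char) : Option (List Char) × List Char :=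
  match st with
  | (some r, suffix) => (some (h :: r), h :: suffix)
  | (none, suffix) =>
    match suffix with
    | [] => (none, h :: suffix)   -- 'suffix and h < suffix[0]' is false on an empty suffix
    | t0 :: tr =>
      if h < t0 then
        -- c = min(d for d in suffix if d > h); the filtered list contains t0, so getD is never used
        let c := (PySem.List.min? ((t0 :: tr).filter (fun d => h < d)) (fun d => d)).getD t0
        -- rest = list(suffix); rest.remove(c); rest.append(h); rest.sort(); c ∈ suffix: getD unused
        let rest := ((PySem.List.remove? (t0 :: tr) c).getD (t0 :: tr)) ++ [h]
        (some (c :: PySem.List.sorted rest (fun d => d) false), h :: suffix)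
      else (none, h :: suffix)

-- for h in reversed(x): … — a left fold over the reversed character list carrying (r, suffix)
def check_alt (x : String) : String :=
  match (x.toList.reverse.foldl (fun st h => nextStep h st) (none, [])).1 with
  | none => "0"
  | some r => String.ofList r

-- ===== PRECONDITION & SPEC =====
-- non-increasing list of characters
abbrev NI (l : List Char) : Prop := List.Pairwise (fun a b => b ≤ a) l

-- Pre_check excludes exactly the inputs on which A raises ValueError: those where the pivot suffix
-- (the unique suffix of length ≥ 3 that is not non-increasing but whose tail is) contains a
-- non-digit character, so that check2 calls int() on it.
def Pre_check (x : String) : Prop :=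
  ∀ k ∈ List.range x.toList.length,
    NI (x.toList.drop (k + 1)) → ¬ NI (x.toList.drop k) → 3 ≤ (x.toList.drop k).length →
      ((x.toList.drop k).all PySem.Chars.isdigit) = true
instance (x : String) : Decidable (Pre_check x) := by unfold Pre_check; infer_instance

def pvWitness_check : String := "102"

-- On inputs whose pivot character also occurs in the non-increasing tail after it, A's check2 picks
-- the smallest tail digit ≥ pivot — the pivot itself — and returns pivot + sorted tail, a
-- permutation SMALLER than the input; B swaps the pivot with the smallest tail character strictly
-- greater than it and returns the true next permutation, which is what the task intends.
def D_check (x : String) : Prop :=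
  ∃ k ∈ List.range x.toList.length,
    NI (x.toList.drop (k + 1)) ∧ ¬ NI (x.toList.drop k) ∧ 3 ≤ (x.toList.drop k).length ∧
      x.toList.getD k ' ' ∈ x.toList.drop (k + 1)
instance (x : String) : Decidable (D_check x) := by unfold D_check; infer_instance

def Spec_check (x : String) (out : String) : Prop := ¬ D_check x → out = check_alt x
instance (x : String) (out : String) : Decidable (Spec_check x out) := by unfold Spec_check; infer_instance

def pvDiffWitness_check : String := "121"
def pvDiffWitnessOut_check : String × String := ("112", "211")

-- ===== CLAIM (what is proved, stated in full; the proofs are below) =====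
def Claim_unchanged_check : Prop := ∀ (x : String), Dom_check x → Pre_check x → Spec_check x (check x)
def Claim_changed_check : Prop := Dom_check (pvDiffWitness_check) ∧ Pre_check (pvDiffWitness_check) ∧ D_check (pvDiffWitness_check) ∧ check (pvDiffWitness_check) = pvDiffWitnessOut_check.1 ∧ check_alt (pvDiffWitness_check) = pvDiffWitnessOut_check.2 ∧ pvDiffWitnessOut_check.1 ≠ pvDiffWitnessOut_check.2
def Claim_exact_check : Prop := ∀ (x : String), Dom_check x → Pre_check x → D_check x → check x ≠ check_alt x

-- ===== LEMMAS AND PROOFS =====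

def nextPerm : List Char → Option (List Char)
  | [] => none
  | [_] => none
  | h :: t0 :: tr =>
    match nextPerm (t0 :: tr) with
    | some r => some (h :: r)
    | none =>
      if t0 ≤ h then none
      else
        let c := (PySem.List.min? ((t0 :: tr).filter (fun d => h < d)) (fun d => d)).getD t0
        let rest := ((PySem.List.remove? (t0 :: tr) c).getD (t0 :: tr)) ++ [h]
        some (c :: PySem.List.sorted rest (fun d => d) false)

theorem sortDesc_eq_of_NI {l : List Char} (h : NI l) :
    (PySem.List.sorted l (fun c => c) false).reverse = l := by
  have : PySem.List.sorted l (fun c => c) false = l.reverse := by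
    apply PySem.List.sorted_id_eq_of_perm_of_pairwise
    · exact l.reverse_perm
    · exact (List.pairwise_reverse).mpr h
  rw [this, List.reverse_reverse]

theorem NI_of_sortDesc_eq {l : List Char} (h : (PySem.List.sorted l (fun c => c) false).reverse = l) :
    NI l := by
  have hp := PySem.List.sorted_pairwise l (fun c => c)
  rw [← h]
  exact (List.pairwise_reverse).mpr hp

theorem replaceFirst_length (l : List Char) (o nw : Char) :
    (replaceFirst l o nw).length = l.length := by
  induction l with
  | nil => rfl
  | cons a r ih => simp only [replaceFirst]; split <;> simp [ih]

theorem check2L_length (l : List Char) : (check2L l).length = l.length := by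
  cases l with
  | nil => rfl
  | cons x0 xt =>
    simp only [check2L, List.length_append, List.length_take, List.length_drop,
      PySem.List.length_sorted, replaceFirst_length, List.length_cons]
    omega

theorem checkL_ne_nil (l : List Char) : checkL l ≠ [] := by
  cases l with
  | nil => simp [checkL]
  | cons h t =>
    simp only [checkL]
    split
    · simp
    · split
      · simp
      · split
        · intro hc
          have := check2L_length (h :: t)
          rw [hc] at this
          simp at this
        · simp

theorem checkL_eq_zero_iff (l : List Char) : checkL l = ['0'] ↔ NI l := by
  constructor
  · intro he
    cases l with
    | nil => exact List.Pairwise.nil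
    | cons h t =>
      by_contra hni
      simp only [checkL] at he
      rw [if_neg (fun hc => hni (NI_of_sortDesc_eq hc))] at he
      by_cases h2 : (h :: t).length = 2
      · rw [if_pos h2] at he
        have hl : (h :: t).length = 1 := by simpa using congrArg List.length he
        omega
      · rw [if_neg h2] at he
        split at he
        · have := check2L_length (h :: t)
          rw [he] at this
          simp at this
          -- length (h::t) = 1 means t = []
          have ht : t = [] := by
            cases t with
            | nil => rfl
            | cons a b => simp at this
          subst ht
          exact hni (List.pairwise_singleton _ _)
        · have := checkL_ne_nil t
          simp at he
          exact this he.2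
  · intro hni
    cases l with
    | nil => rfl
    | cons h t =>
      simp only [checkL]
      rw [if_pos (sortDesc_eq_of_NI hni)]

theorem NI_cons_iff (h t0 : Char) (tr : List Char) :
    NI (h :: t0 :: tr) ↔ (t0 ≤ h ∧ NI (t0 :: tr)) := by
  constructor
  · intro hni
    rcases List.pairwise_cons.mp hni with ⟨hall, ht⟩
    exact ⟨hall t0 (by simp), ht⟩
  · rintro ⟨hle, ht⟩
    refine List.pairwise_cons.mpr ⟨?_, ht⟩
    intro b hb
    rcases List.mem_cons.mp hb with rfl | hb'
    · exact hle
    · exact le_trans (List.rel_of_pairwise_cons ht hb') hle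

theorem nextPerm_eq_none_iff (l : List Char) : nextPerm l = none ↔ NI l := by
  induction l with
  | nil => simp [nextPerm]
  | cons h t ih =>
    cases t with
    | nil => simp [nextPerm]
    | cons t0 tr =>
      simp only [nextPerm]
      cases hn : nextPerm (t0 :: tr) with
      | some r =>
        simp only []
        constructor
        · intro hc; exact absurd hc (by simp)
        · intro hni
          have := (ih).mpr ((NI_cons_iff h t0 tr).mp hni).2
          rw [hn] at this; exact absurd this (by simp)
      | none =>
        have hnit : NI (t0 :: tr) := ih.mp hn
        simp only []
        constructor
        · intro hc
          by_cases hle : t0 ≤ h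
          · exact (NI_cons_iff h t0 tr).mpr ⟨hle, hnit⟩
          · rw [if_neg hle] at hc; exact absurd hc (by simp)
        · intro hni
          rw [if_pos ((NI_cons_iff h t0 tr).mp hni).1]

theorem char_le_toNat (a b : Char) : a ≤ b ↔ a.toNat ≤ b.toNat := by
  rw [Char.le_def, UInt32.le_iff_toNat_le]; rfl


theorem dv_le_iff (a b : Char) : digitVal a ≤ digitVal b ↔ a ≤ b := by
  unfold digitVal
  rw [char_le_toNat]
  omega


theorem dv_mono : Monotone digitVal := fun a b h => (dv_le_iff a b).mpr h

theorem isdigit_toNat {c : Char} (hd : PySem.Chars.isdigit c = true) :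
    48 ≤ c.toNat ∧ c.toNat ≤ 57 := by
  simp only [PySem.Chars.isdigit, Bool.and_eq_true, decide_eq_true_eq,
    char_le_toNat] at hd
  exact ⟨hd.1, hd.2⟩

theorem digitChr_dv {c : Char} (hd : PySem.Chars.isdigit c = true) :
    digitChr (digitVal c) = c := by
  have h48 := isdigit_toNat hd
  unfold digitChr digitVal
  have : ((c.toNat : Int) - 48).toNat + 48 = c.toNat := by omega
  rw [this, Char.ofNat_toNat]

theorem foldl_max_const (l : List Char) (a : Int) (h : ∀ d ∈ l, digitVal d ≤ a) :
    l.foldl (fun m c => max m (digitVal c)) a = a := by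
  induction l with
  | nil => rfl
  | cons c r ih =>
    simp only [List.foldl_cons]
    rw [max_eq_left (h c (by simp))]
    exact ih (fun d hd => h d (by simp [hd]))

theorem minim0_eq (h t0 : Char) (tr : List Char) (hni : NI (t0 :: tr)) (hlt : h < t0) :
    (t0 :: tr).foldl (fun m c => max m (digitVal c)) (digitVal h) = digitVal t0 := by
  simp only [List.foldl_cons]
  rw [max_eq_right ((dv_le_iff h t0).mpr hlt.le)]
  exact foldl_max_const tr (digitVal t0)
    (fun d hd => (dv_le_iff d t0).mpr (List.rel_of_pairwise_cons hni hd))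

theorem foldl_min_filter (h : Char) (l : List Char) (a : Int) (ha : digitVal h ≤ a) :
    l.foldl (fun m c => if digitVal c < m ∧ digitVal h ≤ digitVal c then digitVal c else m) a
      = (l.filter (fun d => decide (digitVal h ≤ digitVal d))).foldl
          (fun m c => min m (digitVal c)) a := by
  induction l generalizing a with
  | nil => rfl
  | cons c r ih =>
    by_cases hc : digitVal h ≤ digitVal c
    · have hd : decide (digitVal h ≤ digitVal c) = true := by simpa using hc
      simp only [List.foldl_cons, List.filter_cons, hd, if_true]
      have hstep : (if digitVal c < a ∧ digitVal h ≤ digitVal c then digitVal c else a)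
          = min a (digitVal c) := by
        split_ifs with hsp <;> omega
      rw [hstep]
      exact ih (min a (digitVal c)) (le_min ha hc)
    · have hd : decide (digitVal h ≤ digitVal c) = false := by simpa using hc
      simp only [List.foldl_cons, List.filter_cons, hd, Bool.false_eq_true, if_false]
      rw [if_neg (fun hand => hc hand.2)]
      exact ih a ha

theorem dv_foldl_min (F : List Char) (a : Char) :
    digitVal (F.foldl min a) = F.foldl (fun m c => min m (digitVal c)) (digitVal a) := by
  induction F generalizing a with
  | nil => rfl
  | cons c r ih =>
    simp only [List.foldl_cons]
    rw [← dv_mono.map_min, ih]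

theorem foldl_min_le_mem {l : List Char} {x : Char} (hx : x ∈ l) (a : Int) :
    l.foldl (fun m c => min m (digitVal c)) a ≤ digitVal x := by
  induction l generalizing a with
  | nil => simp at hx
  | cons c r ih =>
    simp only [List.foldl_cons]
    rcases List.mem_cons.mp hx with rfl | hx'
    · -- result ≤ init
      have : ∀ (r : List Char) (b : Int),
          r.foldl (fun m c => min m (digitVal c)) b ≤ b := by
        intro r
        induction r with
        | nil => intro b; simp
        | cons d s ihs =>
          intro b
          simp only [List.foldl_cons]
          exact le_trans (ihs (min b (digitVal d))) (min_le_left _ _)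
      exact le_trans (this r _) (min_le_right _ _)
    · exact ih hx' _

theorem le_foldl_min (l : List Char) (a c : Int) (hc : c ≤ a) (h : ∀ d ∈ l, c ≤ digitVal d) :
    c ≤ l.foldl (fun m c => min m (digitVal c)) a := by
  induction l generalizing a with
  | nil => simpa
  | cons d r ih =>
    simp only [List.foldl_cons]
    exact ih (min a (digitVal d)) (le_min hc (h d (by simp))) (fun e he => h e (by simp [he]))

theorem replaceFirst_perm {l : List Char} {v : Char} (hv : v ∈ l) (w : Char) :
    (replaceFirst l v w).Perm (l.erase v ++ [w]) := by
  induction l with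
  | nil => simp at hv
  | cons a r ih =>
    by_cases hav : a = v
    · subst hav
      simp only [replaceFirst, List.erase_cons_head]
      exact (List.perm_append_singleton w r).symm
    · simp only [replaceFirst, if_neg hav]
      rw [List.erase_cons_tail (by simpa using fun hh : a = v => hav hh)]
      have hvr : v ∈ r := by
        rcases List.mem_cons.mp hv with rfl | hvr
        · exact absurd rfl hav
        · exact hvr
      exact List.Perm.trans (List.Perm.cons a (ih hvr)) (by simp)

theorem replaceFirst_cons_ne {a o : Char} (hne : a ≠ o) (r : List Char) (nw : Char) :
    replaceFirst (a :: r) o nw = a :: replaceFirst r o nw := by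
  simp only [replaceFirst, if_neg hne]

theorem replaceFirst_cons_eq (a : Char) (r : List Char) (nw : Char) :
    replaceFirst (a :: r) a nw = nw :: r := by
  simp [replaceFirst]

theorem check2L_eq_next (h t0 : Char) (tr : List Char)
    (hni : NI (t0 :: tr)) (hlt : h < t0)
    (hdig : ∀ c ∈ h :: t0 :: tr, PySem.Chars.isdigit c = true)
    (hnm : h ∉ t0 :: tr) :
    check2L (h :: t0 :: tr) =
      ((PySem.List.min? ((t0 :: tr).filter (fun d => h < d)) (fun d => d)).getD t0) ::
        PySem.List.sorted
          (((PySem.List.remove? (t0 :: tr)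
              ((PySem.List.min? ((t0 :: tr).filter (fun d => h < d)) (fun d => d)).getD t0)).getD
             (t0 :: tr)) ++ [h])
          (fun d => d) false := by
  have hfe : (t0 :: tr).filter (fun d => decide (digitVal h ≤ digitVal d))
      = (t0 :: tr).filter (fun d => h < d) := by
    apply List.filter_congr
    intro d hd
    have hne : h ≠ d := fun he => hnm (he ▸ hd)
    simp only [decide_eq_decide, dv_le_iff]
    exact ⟨fun hle => lt_of_le_of_ne hle hne, fun hl => hl.le⟩
  have hf0 : (t0 :: tr).filter (fun d => h < d)
      = t0 :: tr.filter (fun d => h < d) := by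
    rw [List.filter_cons_of_pos (by simpa using hlt)]
  set F := tr.filter (fun d => h < d) with hF
  set cB := List.foldl min t0 F with hcB
  have hmin? : PySem.List.min? ((t0 :: tr).filter (fun d => h < d)) (fun d => d) = some cB := by
    rw [hf0]; exact PySem.List.min?_id_cons t0 F
  have hgetD : (PySem.List.min? ((t0 :: tr).filter (fun d => h < d)) (fun d => d)).getD t0 = cB := by
    rw [hmin?]; rfl
  have hcBf : cB ∈ (t0 :: tr).filter (fun d => h < d) := PySem.List.min?_mem hmin?
  have hcBt : cB ∈ t0 :: tr := (List.mem_filter.mp hcBf).1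
  have hhcB : h < cB := by simpa using (List.mem_filter.mp hcBf).2
  have hne : h ≠ cB := ne_of_lt hhcB
  have hm0 := minim0_eq h t0 tr hni hlt
  have hmin : (t0 :: tr).foldl
      (fun m c => if digitVal c < m ∧ digitVal h ≤ digitVal c then digitVal c else m) (digitVal t0)
      = digitVal cB := by
    rw [foldl_min_filter h _ _ ((dv_le_iff h t0).mpr hlt.le), hfe, hf0]
    simp only [List.foldl_cons, min_self]
    rw [hcB, dv_foldl_min]
  have hdigc : digitChr (digitVal cB) = cB := digitChr_dv (hdig cB (List.mem_cons_of_mem h hcBt))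
  have hperm := replaceFirst_perm hcBt h
  simp only [check2L]
  rw [hm0, hmin, hdigc]
  rw [replaceFirst_cons_ne hne, List.headD_cons, replaceFirst_cons_eq]
  rw [show List.take 1 (cB :: replaceFirst (t0 :: tr) cB h) = [cB] from rfl]
  rw [show List.drop 1 (cB :: replaceFirst (t0 :: tr) cB h) = replaceFirst (t0 :: tr) cB h from rfl]
  rw [hgetD, PySem.List.remove?_eq_some_erase _ cB hcBt, Option.getD_some]
  rw [PySem.List.sorted_eq_sorted_of_perm _ _ (fun c : Char => c) Function.injective_id hperm]
  rfl

theorem check2L_eq_dup (h t0 : Char) (tr : List Char)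
    (hni : NI (t0 :: tr)) (hlt : h < t0)
    (hdig : ∀ c ∈ h :: t0 :: tr, PySem.Chars.isdigit c = true)
    (hmem : h ∈ t0 :: tr) :
    check2L (h :: t0 :: tr) = h :: PySem.List.sorted (t0 :: tr) (fun d => d) false := by
  have hm0 := minim0_eq h t0 tr hni hlt
  have hmin : (t0 :: tr).foldl
      (fun m c => if digitVal c < m ∧ digitVal h ≤ digitVal c then digitVal c else m) (digitVal t0)
      = digitVal h := by
    rw [foldl_min_filter h _ _ ((dv_le_iff h t0).mpr hlt.le)]
    apply le_antisymm
    · exact foldl_min_le_mem (List.mem_filter.mpr ⟨hmem, by simp⟩) _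
    · exact le_foldl_min _ _ _ ((dv_le_iff h t0).mpr hlt.le)
        (fun d hd => by simpa using (List.mem_filter.mp hd).2)
  have hdigc : digitChr (digitVal h) = h := digitChr_dv (hdig h (by simp))
  simp only [check2L]
  rw [hm0, hmin, hdigc]
  rw [replaceFirst_cons_eq, List.headD_cons, replaceFirst_cons_eq]
  rw [show List.take 1 (h :: t0 :: tr) = [h] from rfl]
  rw [show List.drop 1 (h :: t0 :: tr) = t0 :: tr from rfl]
  rfl

theorem checkL_cons (h : Char) (t : List Char) :
    checkL (h :: t) =
      if (PySem.List.sorted (h :: t) (fun c => c) false).reverse = h :: t then ['0']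
      else if (h :: t).length = 2 then (h :: t).reverse
      else if checkL t = ['0'] then check2L (h :: t)
      else h :: checkL t := by
  rw [checkL.eq_def]

theorem nextPerm_some (h t0 : Char) (tr r : List Char) (hr : nextPerm (t0 :: tr) = some r) :
    nextPerm (h :: t0 :: tr) = some (h :: r) := by
  rw [nextPerm.eq_def]
  simp only [hr]

theorem nextPerm_none_branch (h t0 : Char) (tr : List Char) (hn : nextPerm (t0 :: tr) = none)
    (hlt : ¬ t0 ≤ h) :
    nextPerm (h :: t0 :: tr) =
      some (((PySem.List.min? ((t0 :: tr).filter (fun d => h < d)) (fun d => d)).getD t0) ::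
        PySem.List.sorted
          (((PySem.List.remove? (t0 :: tr)
              ((PySem.List.min? ((t0 :: tr).filter (fun d => h < d)) (fun d => d)).getD t0)).getD
             (t0 :: tr)) ++ [h]) (fun d => d) false) := by
  rw [nextPerm.eq_def]
  simp only [hn, if_neg hlt]

theorem foldr_nextStep (cs : List Char) :
    cs.foldr nextStep (none, []) = (nextPerm cs, cs) := by
  induction cs with
  | nil => rfl
  | cons h t ih =>
    rw [List.foldr_cons, ih]
    cases t with
    | nil => rfl
    | cons t0 tr =>
      cases hn : nextPerm (t0 :: tr) with
      | some r => rw [nextPerm_some h t0 tr r hn]; rfl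
      | none =>
        by_cases hlt : h < t0
        · rw [nextPerm_none_branch h t0 tr hn (not_le.mpr hlt)]
          simp only [nextStep, if_pos hlt]
        · have : nextPerm (h :: t0 :: tr) = none := by
            rw [nextPerm.eq_def]
            simp only [hn, if_pos (not_lt.mp hlt)]
          rw [this]
          simp only [nextStep, if_neg hlt]

theorem check_alt_eq (x : String) :
    check_alt x = (match nextPerm x.toList with
      | none => "0"
      | some r => String.ofList r) := by
  unfold check_alt
  rw [List.foldl_reverse]
  rw [show List.foldr (fun x y => nextStep x y) ((none : Option (List Char)), ([] : List Char))
        x.toList = (nextPerm x.toList, x.toList) from foldr_nextStep x.toList]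

def PreL (cs : List Char) : Prop :=
  ∀ k ∈ List.range cs.length,
    NI (cs.drop (k + 1)) → ¬ NI (cs.drop k) → 3 ≤ (cs.drop k).length →
      ((cs.drop k).all PySem.Chars.isdigit) = true
def DL (cs : List Char) : Prop :=
  ∃ k ∈ List.range cs.length,
    NI (cs.drop (k + 1)) ∧ ¬ NI (cs.drop k) ∧ 3 ≤ (cs.drop k).length ∧
      cs.getD k ' ' ∈ cs.drop (k + 1)

theorem PreL_tail (h : Char) (t : List Char) (hp : PreL (h :: t)) : PreL t := by
  intro k hk hni hnni hlen
  have hk' : k + 1 ∈ List.range (h :: t).length := by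
    simp only [List.mem_range] at hk ⊢
    simp
    omega
  exact hp (k + 1) hk' hni hnni hlen

theorem NDL_tail (h : Char) (t : List Char) (hnd : ¬ DL (h :: t)) : ¬ DL t := by
  intro ⟨k, hk, c1, c2, c3, c4⟩
  exact hnd ⟨k + 1, by simp only [List.mem_range] at hk ⊢; simp; omega, c1, c2, c3, c4⟩

theorem PreL_head (h : Char) (t : List Char) (hp : PreL (h :: t))
    (hni1 : NI t) (hni0 : ¬ NI (h :: t)) (hlen : 3 ≤ (h :: t).length) :
    ∀ c ∈ h :: t, PySem.Chars.isdigit c = true := by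
  have := hp 0 (by simp) (by simpa using hni1) (by simpa using hni0) (by simpa using hlen)
  simpa [List.all_eq_true] using this

theorem NDL_head (h : Char) (t : List Char) (hnd : ¬ DL (h :: t))
    (hni1 : NI t) (hni0 : ¬ NI (h :: t)) (hlen : 3 ≤ (h :: t).length) :
    h ∉ t := by
  intro hmem
  exact hnd ⟨0, by simp, by simpa using hni1, by simpa using hni0, by simpa using hlen,
    by simpa using hmem⟩

theorem cB_spec (h t0 : Char) (tr : List Char) (hlt : h < t0) :
    h < (PySem.List.min? ((t0 :: tr).filter (fun d => h < d)) (fun d => d)).getD t0 ∧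
      (PySem.List.min? ((t0 :: tr).filter (fun d => h < d)) (fun d => d)).getD t0 ∈ t0 :: tr := by
  have hf0 : (t0 :: tr).filter (fun d => h < d)
      = t0 :: tr.filter (fun d => h < d) := by
    rw [List.filter_cons_of_pos (by simpa using hlt)]
  have hmin? : PySem.List.min? ((t0 :: tr).filter (fun d => h < d)) (fun d => d)
      = some (List.foldl min t0 (tr.filter (fun d => h < d))) := by
    rw [hf0]; exact PySem.List.min?_id_cons t0 _
  have hcBf := PySem.List.min?_mem hmin?
  rw [hmin?]
  exact ⟨by simpa using (List.mem_filter.mp hcBf).2, (List.mem_filter.mp hcBf).1⟩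


theorem main_eq (l : List Char) (hpre : PreL l) (hnd : ¬ DL l) :
    checkL l = (nextPerm l).getD ['0'] := by
  induction l with
  | nil => rfl
  | cons h t ih =>
    by_cases hni : NI (h :: t)
    · rw [(checkL_eq_zero_iff _).mpr hni, (nextPerm_eq_none_iff _).mpr hni]; rfl
    · have hsd : ¬ ((PySem.List.sorted (h :: t) (fun c => c) false).reverse = h :: t) :=
        fun hc => hni (NI_of_sortDesc_eq hc)
      cases t with
      | nil => exact absurd (List.pairwise_singleton _ _) hni
      | cons t0 tr =>
        by_cases hnit : NI (t0 :: tr)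
        · have hlt : h < t0 := by
            by_contra hge
            push_neg at hge
            exact hni ((NI_cons_iff h t0 tr).mpr ⟨hge, hnit⟩)
          have hnone := (nextPerm_eq_none_iff (t0 :: tr)).mpr hnit
          cases tr with
          | nil =>
            rw [checkL_cons, if_neg hsd, if_pos (show ([h, t0] : List Char).length = 2 from rfl),
              nextPerm_none_branch h t0 [] hnone (not_le.mpr hlt)]
            have hflt : List.filter (fun d => decide (h < d)) [t0] = [t0] := by
              simp [hlt]
            rw [hflt, PySem.List.min?_id_cons]
            simp [PySem.List.remove?_cons_self]
            rfl
          | cons t1 tr' =>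
            have hdig := PreL_head h _ hpre hnit hni (by simp)
            have hnm := NDL_head h _ hnd hnit hni (by simp)
            rw [checkL_cons, if_neg hsd, if_neg (by simp), (checkL_eq_zero_iff _).mpr hnit,
              if_pos (show (['0'] : List Char) = ['0'] from rfl),
              nextPerm_none_branch h t0 (t1 :: tr') hnone (not_le.mpr hlt)]
            rw [check2L_eq_next h t0 (t1 :: tr') hnit hlt hdig hnm]
            rfl
        · have hne0 : checkL (t0 :: tr) ≠ ['0'] := fun hc => hnit ((checkL_eq_zero_iff _).mp hc)
          obtain ⟨r, hr⟩ : ∃ r, nextPerm (t0 :: tr) = some r := by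
            cases hn : nextPerm (t0 :: tr) with
            | none => exact absurd ((nextPerm_eq_none_iff _).mp hn) hnit
            | some r => exact ⟨r, rfl⟩
          have iht := ih (PreL_tail h _ hpre) (NDL_tail h _ hnd)
          rw [hr] at iht
          have hlen2 : ¬ ((h :: t0 :: tr).length = 2) := by
            cases tr with
            | nil => exact absurd (List.pairwise_singleton _ _) hnit
            | cons a b => simp
          rw [checkL_cons, if_neg hsd, if_neg hlen2, if_neg hne0,
            nextPerm_some h t0 tr r hr, iht]
          rfl

theorem main_ne (l : List Char) (hpre : PreL l) (hd : DL l) :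
    checkL l ≠ (nextPerm l).getD ['0'] := by
  induction l with
  | nil => obtain ⟨k, hk, -⟩ := hd; simp at hk
  | cons h t ih =>
    obtain ⟨k, hk, hni1, hni0, hlen, hmem⟩ := hd
    cases k with
    | zero =>
      simp only [List.drop_zero, List.drop_succ_cons] at hni0 hlen hni1
      have hmem' : h ∈ t := by simpa using hmem
      have hnil : ¬ NI (h :: t) := hni0
      have hsd : ¬ ((PySem.List.sorted (h :: t) (fun c => c) false).reverse = h :: t) :=
        fun hc => hnil (NI_of_sortDesc_eq hc)
      cases t with
      | nil => simp at hmem'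
      | cons t0 tr =>
        cases tr with
        | nil => simp at hlen
        | cons t1 tr' =>
          have hnit : NI (t0 :: t1 :: tr') := by simpa using hni1
          have hlt : h < t0 := by
            by_contra hge
            push_neg at hge
            exact hnil ((NI_cons_iff h t0 _).mpr ⟨hge, hnit⟩)
          have hdig := PreL_head h _ hpre hnit hnil (by simp)
          have hnone := (nextPerm_eq_none_iff (t0 :: t1 :: tr')).mpr hnit
          rw [checkL_cons, if_neg hsd, if_neg (by simp), (checkL_eq_zero_iff _).mpr hnit,
            if_pos (show (['0'] : List Char) = ['0'] from rfl),
            nextPerm_none_branch h t0 (t1 :: tr') hnone (not_le.mpr hlt)]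
          rw [check2L_eq_dup h t0 _ hnit hlt hdig hmem']
          intro heq
          simp only [Option.getD_some, List.cons.injEq] at heq
          exact ne_of_lt (cB_spec h t0 (t1 :: tr') hlt).1 heq.1
    | succ k' =>
      have hk' : k' < t.length := by simpa using hk
      have hd' : DL t := by
        refine ⟨k', by simpa using hk', ?_, ?_, ?_, ?_⟩
        · simpa using hni1
        · simpa using hni0
        · simpa using hlen
        · simpa using hmem
      have hnit : ¬ NI t := by
        intro hni
        have h1 : ¬ NI (t.drop k') := by simpa using hni0
        exact h1 (List.Pairwise.drop hni)
      have hnil : ¬ NI (h :: t) := by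
        intro hni
        exact hnit (List.pairwise_cons.mp hni).2
      have hsd : ¬ ((PySem.List.sorted (h :: t) (fun c => c) false).reverse = h :: t) :=
        fun hc => hnil (NI_of_sortDesc_eq hc)
      cases t with
      | nil => simp at hk'
      | cons t0 tr =>
        have hne0 : checkL (t0 :: tr) ≠ ['0'] := fun hc => hnit ((checkL_eq_zero_iff _).mp hc)
        obtain ⟨r, hr⟩ : ∃ r, nextPerm (t0 :: tr) = some r := by
          cases hn : nextPerm (t0 :: tr) with
          | none => exact absurd ((nextPerm_eq_none_iff _).mp hn) hnit
          | some r => exact ⟨r, rfl⟩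
        have iht := ih (PreL_tail h _ hpre) hd'
        rw [hr] at iht
        have hlen2 : ¬ ((h :: t0 :: tr).length = 2) := by
          cases tr with
          | nil =>
            exfalso
            exact hnit (List.pairwise_singleton _ _)
          | cons a b => simp
        rw [checkL_cons, if_neg hsd, if_neg hlen2, if_neg hne0, nextPerm_some h t0 tr r hr]
        intro heq
        simp only [Option.getD_some, List.cons.injEq] at heq
        exact iht heq.2

-- ===== VERDICT (by name: the statement is the Claim_ definition above) =====
theorem check_spec : Claim_unchanged_check := by
  intro x _ hpre hnd
  show check x = check_alt x
  have hm := main_eq x.toList hpre hnd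
  unfold check
  rw [check_alt_eq]
  cases hn : nextPerm x.toList with
  | none =>
    rw [hn] at hm
    rw [hm]
    decide
  | some r =>
    rw [hn] at hm
    rw [hm]
    rfl

theorem check_changed : Claim_changed_check := by unfold Claim_changed_check; decide

theorem check_tight : Claim_exact_check := by
  intro x _ hpre hd heq
  have hm := main_ne x.toList hpre hd
  apply hm
  unfold check at heq
  rw [check_alt_eq] at heq
  cases hn : nextPerm x.toList with
  | none =>
    exfalso
    obtain ⟨k, hk, c1, c2, c3, c4⟩ := hd
    exact c2 (List.Pairwise.drop ((nextPerm_eq_none_iff _).mp hn))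
  | some r =>
    simp only [hn] at heq
    simpa using String.ofList_inj.mp heq
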